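-- pv_equiv track=rewrite | github.com/Carperis/WebRTC_Testbench | testbench/auto_record/noise_cancellation.py | generate_filter_code
-- ===== SOURCE A (Python) =====
-- def generate_filter_code(public_ips, tcp_stream_ids, udp_stream_ids):
--     # Generate a filter code string for Wireshark
--     # IPv4 source filter
--     filters = [f'ip.src == {ip}' for ip in public_ips if ':' not in ip]
--     # IPv4 destination filter
--     filters += [f'ip.dst == {ip}' for ip in public_ips if ':' not in ip]
--     # IPv6 source filter
--     filters += [f'ipv6.src == {ip}' for ip in public_ips if ':' in ip]
--     # IPv6 destination filter
--     filters += [f'ipv6.dst == {ip}' for ip in public_ips if ':' in ip]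
--     filters += [f'tcp.stream eq {stream_id}' for stream_id in tcp_stream_ids]
--     filters += [f'udp.stream eq {stream_id}' for stream_id in udp_stream_ids]
--     filter_code = ' or '.join(filters)
--
--     return "!(" + filter_code + ")"
-- ===== SOURCE B (Python) =====
-- def generate_filter_code(public_ips, tcp_stream_ids, udp_stream_ids):
--     # Table-driven: iterate a spec table of (prefix, items, keep) sections and
--     # write the result string directly, emitting ' or ' separators on the fly;
--     # no intermediate list of filter strings and no join.
--     sections = [
--         ('ip.src == ', public_ips, lambda ip: ':' not in ip),
--         ('ip.dst == ', public_ips, lambda ip: ':' not in ip),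
--         ('ipv6.src == ', public_ips, lambda ip: ':' in ip),
--         ('ipv6.dst == ', public_ips, lambda ip: ':' in ip),
--         ('tcp.stream eq ', [str(s) for s in tcp_stream_ids], lambda _: True),
--         ('udp.stream eq ', [str(s) for s in udp_stream_ids], lambda _: True),
--     ]
--     out = '!('
--     first = True
--     for prefix, items, keep in sections:
--         for x in items:
--             if keep(x):
--                 if not first:
--                     out += ' or '
--                 out += prefix + x
--                 first = False
--     return out + ')'
-- ===== Notes on version B (the rewrite author's own statement) =====
-- stated objective: alternative
-- what changed: B is table-driven: it iterates a spec table of (prefix, items, keep-predicate) sections and writes the output string directly, emitting ' or ' separators on the fly with a first-flag, instead of A's six list comprehensions collected into a filters list that is joined at the end.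
import Mathlib
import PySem

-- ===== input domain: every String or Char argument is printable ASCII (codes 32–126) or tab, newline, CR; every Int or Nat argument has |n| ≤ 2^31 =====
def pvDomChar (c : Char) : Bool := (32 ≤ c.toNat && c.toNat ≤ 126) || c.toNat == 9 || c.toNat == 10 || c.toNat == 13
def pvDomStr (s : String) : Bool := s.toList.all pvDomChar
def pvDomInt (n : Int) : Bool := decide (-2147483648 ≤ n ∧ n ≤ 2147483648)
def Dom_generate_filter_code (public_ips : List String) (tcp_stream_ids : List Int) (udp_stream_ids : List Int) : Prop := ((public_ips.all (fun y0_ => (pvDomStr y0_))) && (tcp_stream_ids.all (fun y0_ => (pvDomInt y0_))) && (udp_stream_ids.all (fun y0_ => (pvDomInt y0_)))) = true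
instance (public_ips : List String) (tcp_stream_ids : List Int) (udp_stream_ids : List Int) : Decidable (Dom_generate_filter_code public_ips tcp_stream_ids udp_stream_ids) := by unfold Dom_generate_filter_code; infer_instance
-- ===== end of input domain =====

-- B is table-driven: it iterates a spec table of (prefix, items, keep) sections and writes
-- the output string directly with on-the-fly ' or ' separators — no filters list, no join
-- (objective: alternative decomposition).


-- f-string pieces: plain string concatenation, done on List Char (exact: Python + on str)
def pvCat2 (a : String) (b : String) : String := String.ofList (a.toList ++ b.toList)
def pvCat3 (a : String) (b : String) (c : String) : String := String.ofList (a.toList ++ b.toList ++ c.toList)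

-- ===== PORT A =====
def generate_filter_code (public_ips : List String) (tcp_stream_ids : List Int) (udp_stream_ids : List Int) : String :=
  let filters := (public_ips.filter (fun ip => !(PySem.Str.isIn ":" ip))).map (fun ip => pvCat2 "ip.src == " ip)
  let filters := filters ++ (public_ips.filter (fun ip => !(PySem.Str.isIn ":" ip))).map (fun ip => pvCat2 "ip.dst == " ip)
  let filters := filters ++ (public_ips.filter (fun ip => PySem.Str.isIn ":" ip)).map (fun ip => pvCat2 "ipv6.src == " ip)
  let filters := filters ++ (public_ips.filter (fun ip => PySem.Str.isIn ":" ip)).map (fun ip => pvCat2 "ipv6.dst == " ip)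
  let filters := filters ++ tcp_stream_ids.map (fun sid => pvCat2 "tcp.stream eq " (PySem.Int.toStr sid))
  let filters := filters ++ udp_stream_ids.map (fun sid => pvCat2 "udp.stream eq " (PySem.Int.toStr sid))
  let filter_code := PySem.Str.join " or " filters
  pvCat3 "!(" filter_code ")"

-- ===== PORT B =====
-- the spec table of Source B: (prefix, items, keep) sections
def gfcSections (public_ips : List String) (tcp_stream_ids : List Int) (udp_stream_ids : List Int) :
    List (String × List String × (String → Bool)) :=
  [("ip.src == ", public_ips, fun ip => !(PySem.Str.isIn ":" ip)),
   ("ip.dst == ", public_ips, fun ip => !(PySem.Str.isIn ":" ip)),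
   ("ipv6.src == ", public_ips, fun ip => PySem.Str.isIn ":" ip),
   ("ipv6.dst == ", public_ips, fun ip => PySem.Str.isIn ":" ip),
   ("tcp.stream eq ", tcp_stream_ids.map PySem.Int.toStr, fun _ => true),
   ("udp.stream eq ", udp_stream_ids.map PySem.Int.toStr, fun _ => true)]

-- the inner loop body: state = (out as chars, first); emit separator + prefix + item if kept
def gfcStep (pre : String) (keep : String → Bool) (st : List Char × Bool) (x : String) : List Char × Bool :=
  if keep x then
    ((if st.2 then st.1 else st.1 ++ (" or ").toList) ++ pre.toList ++ x.toList, false)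
  else st

def generate_filter_code_alt (public_ips : List String) (tcp_stream_ids : List Int) (udp_stream_ids : List Int) : String :=
  let fin := (gfcSections public_ips tcp_stream_ids udp_stream_ids).foldl
    (fun st sec => sec.2.1.foldl (gfcStep sec.1 sec.2.2) st) (("!(").toList, true)
  String.ofList (fin.1 ++ [')'])

-- ===== PRECONDITION & SPEC =====
def Spec_generate_filter_code (public_ips : List String) (tcp_stream_ids : List Int) (udp_stream_ids : List Int) (out : String) : Prop := out = generate_filter_code_alt public_ips tcp_stream_ids udp_stream_ids
instance (public_ips : List String) (tcp_stream_ids : List Int) (udp_stream_ids : List Int) (out : String) : Decidable (Spec_generate_filter_code public_ips tcp_stream_ids udp_stream_ids out) := by unfold Spec_generate_filter_code; infer_instance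

-- ===== CLAIM =====
def Claim_equal_generate_filter_code : Prop := ∀ (public_ips : List String) (tcp_stream_ids : List Int) (udp_stream_ids : List Int), Dom_generate_filter_code public_ips tcp_stream_ids udp_stream_ids → Spec_generate_filter_code public_ips tcp_stream_ids udp_stream_ids (generate_filter_code public_ips tcp_stream_ids udp_stream_ids)

-- ===== LEMMAS AND PROOFS =====
-- what the emitter writes for a list of pieces, given the incoming first-flag
def emitAll (first : Bool) (l : List (List Char)) : List Char :=
  match l with
  | [] => []
  | x :: xs => (if first then x else (" or ").toList ++ x) ++ emitAll false xs

theorem emitAll_append (first : Bool) (l1 l2 : List (List Char)) :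
    emitAll first (l1 ++ l2) = emitAll first l1 ++ emitAll (first && l1.isEmpty) l2 := by
  induction l1 generalizing first with
  | nil => simp [emitAll]
  | cons x xs ih => cases first <;> simp [emitAll, ih]

-- one section's inner loop, characterised
theorem gfc_sec_fold (pre : String) (keep : String → Bool) (items : List String)
    (cs : List Char) (first : Bool) :
    items.foldl (gfcStep pre keep) (cs, first) =
      (cs ++ emitAll first ((items.filter keep).map (fun x => pre.toList ++ x.toList)),
       first && (items.filter keep).isEmpty) := by
  induction items generalizing cs first with
  | nil => simp [emitAll]
  | cons x xs ih =>
    by_cases h : keep x = true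
    · cases first <;> simp [gfcStep, h, ih, emitAll]
    · simp only [Bool.not_eq_true] at h
      simp [gfcStep, h, ih]

-- Python's join is the emitter started with first = true
theorem inter_emit (ys : List (List Char)) (x : List Char) :
    (List.intersperse [' ', 'o', 'r', ' '] (x :: ys)).flatten = x ++ emitAll false ys := by
  induction ys generalizing x with
  | nil => simp [List.intersperse, emitAll]
  | cons y ys ih => simp [List.intersperse, emitAll, ih]

theorem join_eq_emitAll (fs : List String) :
    (PySem.Str.join " or " fs).toList = emitAll true (fs.map String.toList) := by
  simp only [PySem.Str.join, PySem.Chars.join, String.toList_ofList]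
  cases fs with
  | nil => simp [List.intercalate, emitAll]
  | cons x xs =>
    simp only [List.intercalate, List.map_cons, emitAll]
    simp only [show (" or ").toList = [' ', 'o', 'r', ' '] from rfl]
    simp [inter_emit]

-- ===== VERDICT =====
theorem generate_filter_code_spec : Claim_equal_generate_filter_code := by
  intro pips tcp udp _
  unfold Spec_generate_filter_code generate_filter_code generate_filter_code_alt
  simp only [gfcSections, List.foldl_cons, List.foldl_nil, gfc_sec_fold, List.filter_true,
    List.map_map, Function.comp_def, pvCat3]
  rw [join_eq_emitAll]
  simp [emitAll_append, pvCat2, List.map_map, Function.comp_def, List.append_assoc,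
    Bool.and_assoc]
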